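-- pv_equiv track=rewrite | github.com/guidopastorino/lcc | PROGRAMACIÓN II/Finales/TP2/main.py | obtener_secuencia_afinidades
-- ===== SOURCE A (Python) =====
-- from typing import Union
--
-- def obtener_secuencia_afinidades(afinidades, persona1, persona2, K) -> Union[list[str], None]:
--     """
--     * Obtiene una secuencia (camino) de longitud K en la cuales la persona de inicio (persona1) está conectada con la persona final (persona2) a través de un algoritmo 'Depth First Search'
--
--     Parama:
--         * afinidades (list(list(str))): Una lista con listas de afinidades formadas por dos personas
--         * persona1 (str): Persona la cual iniciará el camino
--         * persona2 (str): Persona la cual Finalizará el camino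
--         * K (int): Cantidad de frecuencias a encontrar
--
--     Retrun:
--         * (list(str) | None): Si se obtuvo una secuencia de K longitud, retorna una lista con las personas que la conforman, sino, retorna None
--     """
--
--     def dfs(actual, destino, camino):
--         if len(camino) > K:
--             if actual == destino:
--                 return camino
--             else:
--                 return None
--
--         for vecino in grafo.get(actual, []):
--             if vecino not in camino:
--                 resultado = dfs(vecino, destino, camino + [vecino])
--                 if resultado:
--                     return resultado
--
--         return None
--
--
--     grafo = {}
--
--     for a, b in afinidades:
--         grafo.setdefault(a, []).append(b)
--         grafo.setdefault(b, []).append(a)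
--
--     return dfs(persona1, persona2, [persona1])
-- ===== SOURCE B (Python) =====
-- def obtener_secuencia_afinidades(afinidades, persona1, persona2, K):
--     grafo = {}
--     for a, b in afinidades:
--         grafo.setdefault(a, []).append(b)
--         grafo.setdefault(b, []).append(a)
--     stack = [(persona1, [persona1])]
--     while stack:
--         actual, camino = stack.pop()
--         if len(camino) > K:
--             if actual == persona2:
--                 return camino
--             continue
--         for vecino in reversed(grafo.get(actual, [])):
--             if vecino not in camino:
--                 stack.append((vecino, camino + [vecino]))
--     return None
-- ===== Notes on version B (the rewrite author's own statement) =====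
-- stated objective: alternative
-- what changed: The recursive DFS (nested dfs function with per-neighbor early-return) is replaced by an iterative DFS with an explicit LIFO stack of (node, path) frames: the length-K guard is applied when a frame is popped and neighbors are pushed in reverse order so the first path found is identical.
import Mathlib
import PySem

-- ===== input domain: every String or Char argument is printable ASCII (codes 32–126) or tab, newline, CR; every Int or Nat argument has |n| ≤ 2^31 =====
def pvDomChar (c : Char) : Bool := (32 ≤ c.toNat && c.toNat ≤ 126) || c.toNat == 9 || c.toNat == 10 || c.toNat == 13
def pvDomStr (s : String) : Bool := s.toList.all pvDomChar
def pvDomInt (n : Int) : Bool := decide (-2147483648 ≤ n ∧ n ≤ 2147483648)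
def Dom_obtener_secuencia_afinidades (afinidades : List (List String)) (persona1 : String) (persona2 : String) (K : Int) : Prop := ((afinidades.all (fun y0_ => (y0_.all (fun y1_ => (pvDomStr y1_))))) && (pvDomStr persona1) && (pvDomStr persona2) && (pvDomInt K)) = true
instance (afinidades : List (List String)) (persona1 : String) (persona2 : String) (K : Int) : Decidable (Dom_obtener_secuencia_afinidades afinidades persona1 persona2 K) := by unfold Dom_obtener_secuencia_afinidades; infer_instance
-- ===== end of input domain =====

-- B replaces A's recursive DFS by an explicit-stack iterative DFS (guard at pop time, neighbors
-- pushed in reverse), returning the identical first path: objective 'alternative', same cost.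

-- ===== PORT A =====
-- shared helper: the graph-building loop (grafo.setdefault(x, []).append(y) = modify x [] (· ++ [y]))
def pvStep (g : PySem.Dict String (List String)) (l : List String) : PySem.Dict String (List String) :=
  match l with
  | [a, b] => (g.modify a [] (fun xs => xs ++ [b])).modify b [] (fun xs => xs ++ [a])
  | _ => g

def pvBuild (afinidades : List (List String)) : PySem.Dict String (List String) :=
  afinidades.foldl pvStep PySem.Dict.empty

-- termination helpers (cited by the ports' decreasing_by)
-- every neighbour stored in the built graph occurs in some input row
theorem pvBuild_mem_aux (af : List (List String)) (g : PySem.Dict String (List String))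
    (k v : String) (h : v ∈ (af.foldl pvStep g).getD k []) :
    v ∈ g.getD k [] ∨ v ∈ af.flatten := by
  induction af generalizing g with
  | nil => exact Or.inl h
  | cons l rest ih =>
    rcases ih (pvStep g l) h with h' | h'
    · unfold pvStep at h'
      match l with
      | [a, b] =>
        simp only [PySem.Dict.getD_modify] at h'
        split_ifs at h' with h1 h2 h2 <;>
          simp_all [List.mem_append] <;> tauto
      | [] => exact Or.inl h'
      | [a] => exact Or.inl h'
      | a :: b :: c :: t => exact Or.inl h'
    · simp only [List.flatten_cons, List.mem_append]
      tauto

theorem pvBuild_mem (af : List (List String)) (k v : String)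
    (h : v ∈ (pvBuild af).getD k []) : v ∈ af.flatten := by
  rcases pvBuild_mem_aux af PySem.Dict.empty k v h with h' | h'
  · simp [PySem.Dict.getD_empty] at h'
  · exact h'

-- adjacency lists never exceed twice the number of rows
theorem pvBuild_len_aux (af : List (List String)) (g : PySem.Dict String (List String))
    (k : String) :
    ((af.foldl pvStep g).getD k []).length ≤ (g.getD k []).length + 2 * af.length := by
  induction af generalizing g with
  | nil => simp
  | cons l rest ih =>
    have h1 : ((pvStep g l).getD k []).length ≤ (g.getD k []).length + 2 := by
      unfold pvStep
      match l with
      | [a, b] =>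
        simp only [PySem.Dict.getD_modify]
        split_ifs <;> simp_all
      | [] => simp
      | [a] => simp
      | a :: b :: c :: t => simp
    calc ((rest.foldl pvStep (pvStep g l)).getD k []).length
        ≤ ((pvStep g l).getD k []).length + 2 * rest.length := ih (pvStep g l)
      _ ≤ (g.getD k []).length + 2 * (l :: rest).length := by simp [List.length_cons]; omega

theorem pvBuild_len (af : List (List String)) (k : String) :
    ((pvBuild af).getD k []).length ≤ 2 * af.length := by
  have h := pvBuild_len_aux af PySem.Dict.empty k
  simp only [PySem.Dict.getD_empty, List.length_nil, Nat.zero_add] at h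
  exact h

-- DFS measure: number of distinct graph nodes not yet on the path
def pvM (af : List (List String)) (p : List String) : Nat :=
  (af.flatten.toFinset \ p.toFinset).card

theorem pvM_lt (af : List (List String)) {p : List String} {v : String}
    (hv : v ∈ af.flatten) (hnp : v ∉ p) : pvM af (p ++ [v]) < pvM af p := by
  apply Finset.card_lt_card
  constructor
  · intro x hx
    simp only [Finset.mem_sdiff, List.mem_toFinset, List.mem_append, List.mem_singleton] at hx ⊢
    tauto
  · intro hsub
    have hvmem : v ∈ af.flatten.toFinset \ p.toFinset := by
      simp [List.mem_toFinset, hv, hnp]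
    have := hsub hvmem
    simp [List.mem_toFinset] at this

-- port of A's nested recursive dfs (pvLoop is the 'for vecino in grafo.get(actual, [])' loop;
-- the hv argument is a termination-only certificate that every pending neighbour is a graph node)
mutual
def pvDfs (af : List (List String)) (destino : String) (K : Int)
    (actual : String) (camino : List String) : Option (List String) :=
  if (camino.length : Int) > K then
    if actual == destino then some camino else none
  else
    pvLoop af destino K ((pvBuild af).getD actual []) actual camino
      (fun v hv => pvBuild_mem af actual v hv)
termination_by (pvM af camino, ((pvBuild af).getD actual []).length + 1)
decreasing_by
  exact Prod.Lex.right _ (Nat.lt_succ_self _)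

def pvLoop (af : List (List String)) (destino : String) (K : Int)
    (vecinos : List String) (actual : String) (camino : List String)
    (hv : ∀ v ∈ vecinos, v ∈ af.flatten) : Option (List String) :=
  match vecinos with
  | [] => none
  | v :: rest =>
    if hcv : camino.contains v then
      pvLoop af destino K rest actual camino (fun x hx => hv x (List.mem_cons_of_mem _ hx))
    else
      match pvDfs af destino K v (camino ++ [v]) with
      | some r =>
          if r.isEmpty then
            pvLoop af destino K rest actual camino (fun x hx => hv x (List.mem_cons_of_mem _ hx))
          else some r
      | none =>
          pvLoop af destino K rest actual camino (fun x hx => hv x (List.mem_cons_of_mem _ hx))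
termination_by (pvM af camino, vecinos.length)
decreasing_by
  all_goals first
    | exact Prod.Lex.right _ (Nat.lt_succ_self _)
    | · apply Prod.Lex.left
        exact pvM_lt af (hv v (List.mem_cons_self ..)) (by simpa using hcv)
end

def obtener_secuencia_afinidades (afinidades : List (List String)) (persona1 : String) (persona2 : String) (K : Int) : Option (List String) :=
  pvDfs afinidades persona2 K persona1 [persona1]

-- ===== PORT B =====
-- the reversed-push loop over the neighbours (stack held top-first, so Python's append is cons)
def pvPush (camino : List String) (s : List (String × List String)) (ns : List String) :
    List (String × List String) :=
  ns.reverse.foldl (fun s vecino =>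
    if camino.contains vecino then s else (vecino, camino ++ [vecino]) :: s) s

theorem pvPush_aux (camino : List String) :
    ∀ (ns : List String) (s : List (String × List String)),
      ns.foldl (fun s vecino =>
        if camino.contains vecino then s else (vecino, camino ++ [vecino]) :: s) s
      = ((ns.filter (fun v => !camino.contains v)).reverse.map
          (fun v => (v, camino ++ [v]))) ++ s := by
  intro ns
  induction ns with
  | nil => intro s; simp
  | cons v rest ih =>
    intro s
    simp only [List.foldl_cons, List.filter_cons]
    by_cases h : camino.contains v
    · simp only [h, Bool.not_true, Bool.false_eq_true, if_false, if_true]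
      exact ih s
    · simp only [Bool.not_eq_true] at h
      simp only [h, Bool.not_false, if_true, Bool.false_eq_true, if_false]
      rw [ih ((v, camino ++ [v]) :: s)]
      simp [List.reverse_cons]

theorem pvPush_eq (camino : List String) (ns : List String) (s : List (String × List String)) :
    pvPush camino s ns
    = ((ns.filter (fun v => !camino.contains v)).map (fun v => (v, camino ++ [v]))) ++ s := by
  unfold pvPush
  rw [pvPush_aux]
  simp [List.filter_reverse]

-- stack measure: each frame (a, p) weighs (2·|af|+1) ^ pvM af p
def pvMB (af : List (List String)) (stack : List (String × List String)) : Nat :=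
  (stack.map (fun fr => (2 * af.length + 1) ^ pvM af fr.2)).sum

theorem pvMB_tail_lt (af : List (List String)) (fr : String × List String)
    (rest : List (String × List String)) : pvMB af rest < pvMB af (fr :: rest) := by
  unfold pvMB
  simp only [List.map_cons, List.sum_cons]
  have : 0 < (2 * af.length + 1) ^ pvM af fr.2 := Nat.pow_pos (by omega)
  omega

theorem pvMB_expand_lt (af : List (List String)) (actual : String) (camino : List String)
    (rest : List (String × List String)) :
    pvMB af (pvPush camino rest ((pvBuild af).getD actual []))
      < pvMB af ((actual, camino) :: rest) := by
  rw [pvPush_eq]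
  unfold pvMB
  simp only [List.map_append, List.sum_append, List.map_cons, List.sum_cons, List.map_map]
  have hsuff : ((((pvBuild af).getD actual []).filter (fun v => !camino.contains v)).map
      ((fun fr => (2 * af.length + 1) ^ pvM af fr.2) ∘ (fun v => (v, camino ++ [v])))).sum
      < (2 * af.length + 1) ^ pvM af camino := by
    set L := 2 * af.length with hL
    set ns := ((pvBuild af).getD actual []).filter (fun v => !camino.contains v) with hns
    rcases Nat.eq_zero_or_pos ns.length with hz | hpos
    · rw [List.length_eq_zero_iff] at hz
      rw [hz]
      simp only [List.map_nil, List.sum_nil]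
      exact Nat.pow_pos (by omega)
    · -- some neighbour exists, so pvM af camino ≥ 1
      obtain ⟨v0, hv0⟩ := List.exists_mem_of_length_pos hpos
      have hv0' : v0 ∈ (pvBuild af).getD actual [] ∧ ¬ camino.contains v0 := by
        have := List.of_mem_filter hv0
        exact ⟨List.mem_of_mem_filter hv0, by simpa using this⟩
      have hm1 : 1 ≤ pvM af camino := by
        have := pvM_lt af (pvBuild_mem af actual v0 hv0'.1) (by simpa using hv0'.2)
        omega
      have hbound : ∀ x ∈ (ns.map ((fun fr => (L + 1) ^ pvM af fr.2) ∘ (fun v => (v, camino ++ [v])))),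
          x ≤ (L + 1) ^ (pvM af camino - 1) := by
        intro x hx
        simp only [List.mem_map, Function.comp] at hx
        obtain ⟨v, hvmem, rfl⟩ := hx
        have hv' : v ∈ (pvBuild af).getD actual [] ∧ ¬ camino.contains v := by
          have := List.of_mem_filter hvmem
          exact ⟨List.mem_of_mem_filter hvmem, by simpa using this⟩
        have hlt : pvM af (camino ++ [v]) < pvM af camino :=
          pvM_lt af (pvBuild_mem af actual v hv'.1) (by simpa using hv'.2)
        exact Nat.pow_le_pow_right (by omega) (by omega)
      have hsum := List.sum_le_card_nsmul _ _ hbound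
      have hlen : ns.length ≤ L := by
        have h1 : ns.length ≤ ((pvBuild af).getD actual []).length := by
          rw [hns]; exact List.length_filter_le _ _
        have h2 := pvBuild_len af actual
        omega
      have hcount : (ns.map ((fun fr => (L + 1) ^ pvM af fr.2) ∘ (fun v => (v, camino ++ [v])))).length = ns.length := by
        simp
      calc (ns.map ((fun fr => (L + 1) ^ pvM af fr.2) ∘ (fun v => (v, camino ++ [v])))).sum
          ≤ ns.length * (L + 1) ^ (pvM af camino - 1) := by
            rw [hcount] at hsum; simpa [smul_eq_mul] using hsum
        _ ≤ L * (L + 1) ^ (pvM af camino - 1) := Nat.mul_le_mul_right _ hlen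
        _ < (L + 1) * (L + 1) ^ (pvM af camino - 1) := by
            have : 0 < (L + 1) ^ (pvM af camino - 1) := Nat.pow_pos (by omega)
            exact (Nat.mul_lt_mul_right this).mpr (by omega)
        _ = (L + 1) ^ (pvM af camino - 1 + 1) := by ring
        _ = (L + 1) ^ pvM af camino := by congr 1; omega
  omega

def pvLoopB (af : List (List String)) (destino : String) (K : Int) :
    List (String × List String) → Option (List String)
  | [] => none
  | (actual, camino) :: rest =>
    if (camino.length : Int) > K then
      if actual == destino then some camino else pvLoopB af destino K rest
    else
      pvLoopB af destino K (pvPush camino rest ((pvBuild af).getD actual []))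
termination_by stack => pvMB af stack
decreasing_by
  · exact pvMB_tail_lt af _ rest
  · exact pvMB_expand_lt af actual camino rest

def obtener_secuencia_afinidades_alt (afinidades : List (List String)) (persona1 : String) (persona2 : String) (K : Int) : Option (List String) :=
  pvLoopB afinidades persona2 K [(persona1, [persona1])]

-- ===== PRECONDITION & SPEC =====
-- Pre_ excludes exactly the inputs where Python's 'for a, b in afinidades' raises ValueError
-- (a row whose length is not 2); both programs raise there.
def Pre_obtener_secuencia_afinidades (afinidades : List (List String)) (persona1 : String) (persona2 : String) (K : Int) : Prop :=
  ∀ l ∈ afinidades, l.length = 2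
instance (afinidades : List (List String)) (persona1 : String) (persona2 : String) (K : Int) : Decidable (Pre_obtener_secuencia_afinidades afinidades persona1 persona2 K) := by unfold Pre_obtener_secuencia_afinidades; infer_instance

def pvWitness_obtener_secuencia_afinidades : List (List String) × String × String × Int :=
  ([["a", "b"], ["b", "c"]], "a", "c", 2)

def Spec_obtener_secuencia_afinidades (afinidades : List (List String)) (persona1 : String) (persona2 : String) (K : Int) (out : Option (List String)) : Prop := out = obtener_secuencia_afinidades_alt afinidades persona1 persona2 K
instance (afinidades : List (List String)) (persona1 : String) (persona2 : String) (K : Int) (out : Option (List String)) : Decidable (Spec_obtener_secuencia_afinidades afinidades persona1 persona2 K out) := by unfold Spec_obtener_secuencia_afinidades; infer_instance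

-- ===== CLAIM (what is proved, stated in full; the proofs are below) =====
def Claim_equal_obtener_secuencia_afinidades : Prop := ∀ (afinidades : List (List String)) (persona1 : String) (persona2 : String) (K : Int), Dom_obtener_secuencia_afinidades afinidades persona1 persona2 K → Pre_obtener_secuencia_afinidades afinidades persona1 persona2 K → Spec_obtener_secuencia_afinidades afinidades persona1 persona2 K (obtener_secuencia_afinidades afinidades persona1 persona2 K)

-- ===== LEMMAS AND PROOFS =====

-- processing the stack frame by frame = chaining A's dfs over the frames
def pvChain (af : List (List String)) (destino : String) (K : Int) :
    List (String × List String) → Option (List String)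
  | [] => none
  | (a, p) :: rest =>
    match pvDfs af destino K a p with
    | some r => some r
    | none => pvChain af destino K rest

-- A's loop never returns an empty path (it filters on 'if resultado:')
theorem pvLoop_ne_nil (af : List (List String)) (destino : String) (K : Int) :
    ∀ (ns : List String) (actual : String) (camino : List String)
      (hv : ∀ v ∈ ns, v ∈ af.flatten),
      pvLoop af destino K ns actual camino hv ≠ some [] := by
  intro ns
  induction ns with
  | nil => intro actual camino hv; rw [pvLoop]; simp
  | cons v rest ih =>
    intro actual camino hv
    rw [pvLoop]
    split
    · exact ih actual camino _
    · cases hdfs : pvDfs af destino K v (camino ++ [v]) with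
      | none => exact ih actual camino _
      | some r =>
        by_cases hre : r.isEmpty
        · simp only [hre, if_true]; exact ih actual camino _
        · simp only [hre, Bool.false_eq_true, if_false]
          intro hcontra
          apply hre
          simp at hcontra
          simp [hcontra]

-- dfs on a nonempty path never returns an empty path
theorem pvDfs_ne_nil (af : List (List String)) (destino : String) (K : Int)
    (actual : String) (camino : List String) (hp : camino ≠ []) :
    pvDfs af destino K actual camino ≠ some [] := by
  rw [pvDfs]
  split
  · split
    · intro h; apply hp; simpa using h
    · simp
  · exact pvLoop_ne_nil af destino K _ actual camino _

-- chaining A's dfs over the pushed child frames = A's neighbour loop followed by the rest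
theorem pvChain_children (af : List (List String)) (destino : String) (K : Int)
    (actual : String) (camino : List String) :
    ∀ (ns : List String) (hv : ∀ v ∈ ns, v ∈ af.flatten)
      (rest : List (String × List String)),
      pvChain af destino K
        (((ns.filter (fun v => !camino.contains v)).map (fun v => (v, camino ++ [v]))) ++ rest)
      = match pvLoop af destino K ns actual camino hv with
        | some r => some r
        | none => pvChain af destino K rest := by
  intro ns
  induction ns with
  | nil => intro hv rest; rw [pvLoop]; simp
  | cons v tl ih =>
    intro hv rest
    rw [pvLoop]
    simp only [List.filter_cons]
    by_cases hcv : camino.contains v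
    · rw [dif_pos hcv]
      simp only [hcv, Bool.not_true, Bool.false_eq_true, if_false]
      exact ih _ rest
    · rw [dif_neg hcv]
      have hcv' : camino.contains v = false := by simpa using hcv
      simp only [hcv', Bool.not_false, if_true, List.map_cons, List.cons_append]
      simp only [pvChain]
      cases hdfs : pvDfs af destino K v (camino ++ [v]) with
      | none => exact ih _ rest
      | some r =>
        have hr : r ≠ [] := by
          intro hrnil
          exact pvDfs_ne_nil af destino K v (camino ++ [v]) (by simp) (hrnil ▸ hdfs)
        have hre : r.isEmpty = false := by
          cases r with
          | nil => exact absurd rfl hr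
          | cons _ _ => rfl
        simp only [hre, Bool.false_eq_true, if_false]

-- the iterative stack loop computes the chain of A's dfs over its frames
theorem pvBridge (af : List (List String)) (destino : String) (K : Int) :
    ∀ (n : Nat) (stack : List (String × List String)), pvMB af stack ≤ n →
      pvLoopB af destino K stack = pvChain af destino K stack := by
  intro n
  induction n with
  | zero =>
    intro stack hm
    cases stack with
    | nil => rw [pvLoopB, pvChain]
    | cons fr rest =>
      exfalso
      have h1 := pvMB_tail_lt af fr rest
      omega
  | succ n ih =>
    intro stack hm
    cases stack with
    | nil => rw [pvLoopB, pvChain]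
    | cons fr rest =>
      obtain ⟨actual, camino⟩ := fr
      rw [pvLoopB, pvChain, pvDfs]
      by_cases hK : (camino.length : Int) > K
      · simp only [if_pos hK]
        by_cases hd : actual == destino
        · simp [hd]
        · have htail : pvMB af rest ≤ n := by
            have := pvMB_tail_lt af (actual, camino) rest
            omega
          simp only [hd, Bool.false_eq_true, if_false]
          exact ih rest htail
      · simp only [if_neg hK]
        have hexp := pvMB_expand_lt af actual camino rest
        have hle : pvMB af (pvPush camino rest ((pvBuild af).getD actual [])) ≤ n := by omega
        rw [ih _ hle, pvPush_eq, pvChain_children af destino K actual camino]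

-- ===== VERDICT (by name: the statement is the Claim_ definition above) =====
theorem obtener_secuencia_afinidades_spec : Claim_equal_obtener_secuencia_afinidades := by
  intro afinidades persona1 persona2 K _hdom _hpre
  unfold Spec_obtener_secuencia_afinidades
  unfold obtener_secuencia_afinidades obtener_secuencia_afinidades_alt
  rw [pvBridge afinidades persona2 K (pvMB afinidades [(persona1, [persona1])]) _ le_rfl]
  rw [pvChain]
  cases hdfs : pvDfs afinidades persona2 K persona1 [persona1] with
  | none => rw [pvChain]
  | some r => rfl
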